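-- pv_equiv track=rewrite | github.com/tomaskulich/life_expetancy | parse.py | country_equal
-- ===== SOURCE A (Python) =====
-- aliases = [
--   ['Russian Federation', 'Russia'],
--   ['Slovak Republic', 'Slovakia'],
--   ['Venezuela', 'Venezuela, RB'],
--   ['United Republic of Tanzania', 'Tanzania'],
--   ['Iran', 'Iran, Islamic Rep.'],
--   ['United States of America', 'United States'],
--   ['Laos', 'Lao PDR', 'Lao People\'s Democratic Republic'],
--   ['Brunei', 'Brunei Darussalam'],
--   ['Syria', 'Syrian Arab Republic'],
--   ['Cape Verde', 'Cabo Verde'],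
--   ['Republic of Korea', 'Korea, Rep.'],
--   ['Micronesia', 'Micronesia, Fed. Sts.', 'Federated States of Micronesia'],
--   ['Vietnam', 'Viet Nam'],
--   ['Moldova', 'Republic of Moldova'],
--   ['Macedonia', 'Macedonia|Republic of Macedonia', 'Republic of Macedonia|Macedonia'],
--   ['Congo, Dem. Rep.', 'Democratic Republic of the Congo'],
--   ['Ivory Coast', 'Cote d\'Ivoire'],
--   ['Egypt', 'Egypt, Arab Rep.'],
--   ['Bahamas', 'Bahamas, The'],
-- ]
--
-- def country_equal(country1, country2):
--     if country1 == country2: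
--         return True
--     for alias in aliases:
--         for alias1 in alias:
--             for alias2 in alias:
--                 if alias1 != alias2 and alias1 == country1 and alias2 == country2:
--                     return True
--     return False
-- ===== SOURCE B (Python) =====
-- # Precomputed lookup table: each alias name maps to its group index; two names
-- # are equal iff they are identical or map to the same group.
-- group_of = {
--     'Russian Federation': 0,
--     'Russia': 0,
--     'Slovak Republic': 1,
--     'Slovakia': 1,
--     'Venezuela': 2,
--     'Venezuela, RB': 2,
--     'United Republic of Tanzania': 3,
--     'Tanzania': 3,
--     'Iran': 4,
--     'Iran, Islamic Rep.': 4,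
--     'United States of America': 5,
--     'United States': 5,
--     'Laos': 6,
--     'Lao PDR': 6,
--     "Lao People's Democratic Republic": 6,
--     'Brunei': 7,
--     'Brunei Darussalam': 7,
--     'Syria': 8,
--     'Syrian Arab Republic': 8,
--     'Cape Verde': 9,
--     'Cabo Verde': 9,
--     'Republic of Korea': 10,
--     'Korea, Rep.': 10,
--     'Micronesia': 11,
--     'Micronesia, Fed. Sts.': 11,
--     'Federated States of Micronesia': 11,
--     'Vietnam': 12,
--     'Viet Nam': 12,
--     'Moldova': 13,
--     'Republic of Moldova': 13,
--     'Macedonia': 14,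
--     'Macedonia|Republic of Macedonia': 14,
--     'Republic of Macedonia|Macedonia': 14,
--     'Congo, Dem. Rep.': 15,
--     'Democratic Republic of the Congo': 15,
--     'Ivory Coast': 16,
--     "Cote d'Ivoire": 16,
--     'Egypt': 17,
--     'Egypt, Arab Rep.': 17,
--     'Bahamas': 18,
--     'Bahamas, The': 18,
-- }
--
-- def country_equal(country1, country2):
--     if country1 == country2:
--         return True
--     g1 = group_of.get(country1)
--     return g1 is not None and g1 == group_of.get(country2)
-- ===== Notes on version B (the rewrite author's own statement) =====
-- stated objective: alternative
-- what changed: Replaces A's triple nested scan over the nested alias groups by a flat precomputed name-to-group-index lookup table: B is an identity test plus two table lookups compared for equality.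
import Mathlib
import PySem

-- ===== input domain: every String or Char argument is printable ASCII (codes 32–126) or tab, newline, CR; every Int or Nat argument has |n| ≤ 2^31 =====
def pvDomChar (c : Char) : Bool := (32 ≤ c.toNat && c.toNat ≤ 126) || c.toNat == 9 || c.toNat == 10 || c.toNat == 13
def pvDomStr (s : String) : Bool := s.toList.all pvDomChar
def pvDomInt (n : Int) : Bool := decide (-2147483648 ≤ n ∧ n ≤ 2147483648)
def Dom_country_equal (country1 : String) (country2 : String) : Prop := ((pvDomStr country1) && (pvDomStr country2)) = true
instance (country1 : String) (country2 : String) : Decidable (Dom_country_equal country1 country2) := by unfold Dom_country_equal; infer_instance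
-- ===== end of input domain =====

-- B replaces A's triple nested scan over the nested alias groups by a flat precomputed
-- name→group-index lookup table; same return value, an alternative data structure.

-- ===== PORT A =====
-- module-level constant `aliases` of Source A (nested groups, used only by A's scan)
def pvAliases : List (List String) := [
  ["Russian Federation", "Russia"],
  ["Slovak Republic", "Slovakia"],
  ["Venezuela", "Venezuela, RB"],
  ["United Republic of Tanzania", "Tanzania"],
  ["Iran", "Iran, Islamic Rep."],
  ["United States of America", "United States"],
  ["Laos", "Lao PDR", "Lao People's Democratic Republic"],
  ["Brunei", "Brunei Darussalam"],
  ["Syria", "Syrian Arab Republic"],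
  ["Cape Verde", "Cabo Verde"],
  ["Republic of Korea", "Korea, Rep."],
  ["Micronesia", "Micronesia, Fed. Sts.", "Federated States of Micronesia"],
  ["Vietnam", "Viet Nam"],
  ["Moldova", "Republic of Moldova"],
  ["Macedonia", "Macedonia|Republic of Macedonia", "Republic of Macedonia|Macedonia"],
  ["Congo, Dem. Rep.", "Democratic Republic of the Congo"],
  ["Ivory Coast", "Cote d'Ivoire"],
  ["Egypt", "Egypt, Arab Rep."],
  ["Bahamas", "Bahamas, The"]]

-- the triple nested for-loop with early `return True` = nested List.any
def country_equal (country1 : String) (country2 : String) : Bool :=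
  if country1 == country2 then true
  else
    pvAliases.any (fun aliasGrp =>
      aliasGrp.any (fun alias1 =>
        aliasGrp.any (fun alias2 =>
          alias1 != alias2 && alias1 == country1 && alias2 == country2)))

-- ===== PORT B =====
-- Source B's module-level dict literal `group_of` (name → group index)
def pvGroupOf : PySem.Dict String Int := PySem.Dict.ofList [
  ("Russian Federation", 0),
  ("Russia", 0),
  ("Slovak Republic", 1),
  ("Slovakia", 1),
  ("Venezuela", 2),
  ("Venezuela, RB", 2),
  ("United Republic of Tanzania", 3),
  ("Tanzania", 3),
  ("Iran", 4),
  ("Iran, Islamic Rep.", 4),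
  ("United States of America", 5),
  ("United States", 5),
  ("Laos", 6),
  ("Lao PDR", 6),
  ("Lao People's Democratic Republic", 6),
  ("Brunei", 7),
  ("Brunei Darussalam", 7),
  ("Syria", 8),
  ("Syrian Arab Republic", 8),
  ("Cape Verde", 9),
  ("Cabo Verde", 9),
  ("Republic of Korea", 10),
  ("Korea, Rep.", 10),
  ("Micronesia", 11),
  ("Micronesia, Fed. Sts.", 11),
  ("Federated States of Micronesia", 11),
  ("Vietnam", 12),
  ("Viet Nam", 12),
  ("Moldova", 13),
  ("Republic of Moldova", 13),
  ("Macedonia", 14),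
  ("Macedonia|Republic of Macedonia", 14),
  ("Republic of Macedonia|Macedonia", 14),
  ("Congo, Dem. Rep.", 15),
  ("Democratic Republic of the Congo", 15),
  ("Ivory Coast", 16),
  ("Cote d'Ivoire", 16),
  ("Egypt", 17),
  ("Egypt, Arab Rep.", 17),
  ("Bahamas", 18),
  ("Bahamas, The", 18)]

def country_equal_alt (country1 : String) (country2 : String) : Bool :=
  if country1 == country2 then true
  else
    let g1 := pvGroupOf.get? country1
    g1.isSome && (g1 == pvGroupOf.get? country2)   -- `g1 is not None and g1 == group_of.get(country2)`

-- ===== PRECONDITION & SPEC =====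
def Spec_country_equal (country1 : String) (country2 : String) (out : Bool) : Prop := out = country_equal_alt country1 country2
instance (country1 : String) (country2 : String) (out : Bool) : Decidable (Spec_country_equal country1 country2 out) := by unfold Spec_country_equal; infer_instance

-- ===== CLAIM (what is proved, stated in full; the proofs are below) =====
def Claim_equal_country_equal : Prop := ∀ (country1 : String) (country2 : String), Dom_country_equal country1 country2 → Spec_country_equal country1 country2 (country_equal country1 country2)

-- ===== LEMMAS AND PROOFS =====

-- B's literal table is A's nested list flattened with group indices (checked by evaluation)
set_option maxRecDepth 4000 in
lemma pvGroupOf_items_eq :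
    pvGroupOf.items =
      (PySem.List.enumerate pvAliases 0).flatMap (fun p => p.2.map (fun n => (n, p.1))) := by
  decide

set_option maxRecDepth 4000 in
lemma pvGroupOf_keys_nodup : pvGroupOf.keys.Nodup := by decide

-- membership in an index-flattened nested list, characterised
lemma mem_flat_iff (gs : List (List String)) (s : Int) (c : String) (v : Int) :
    (c, v) ∈ (PySem.List.enumerate gs s).flatMap (fun p => p.2.map (fun n => (n, p.1))) ↔
      ∃ i : Nat, ∃ hi : i < gs.length, c ∈ gs[i] ∧ v = s + i := by
  induction gs generalizing s with
  | nil => simp [PySem.List.enumerate_nil]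
  | cons g gs ih =>
    rw [PySem.List.enumerate_cons]
    simp only [List.flatMap_cons, List.mem_append, List.mem_map, Prod.mk.injEq, ih]
    constructor
    · rintro (⟨n, hn, rfl, rfl⟩ | ⟨i, hi, hc, hv⟩)
      · exact ⟨0, by simp, by simpa using hn, by omega⟩
      · exact ⟨i + 1, by simpa using hi, by simpa using hc, by omega⟩
    · rintro ⟨i, hi, hc, hv⟩
      cases i with
      | zero => exact Or.inl ⟨c, by simpa using hc, rfl, by omega⟩
      | succ i =>
        exact Or.inr ⟨i, by simpa using hi, by simpa using hc, by omega⟩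

lemma get?_pvGroupOf_iff (c : String) (v : Int) :
    pvGroupOf.get? c = some v ↔ ∃ i : Nat, ∃ hi : i < pvAliases.length, c ∈ pvAliases[i] ∧ v = (i : Int) := by
  rw [PySem.Dict.get?_eq_some_iff_mem_items pvGroupOf c v pvGroupOf_keys_nodup, pvGroupOf_items_eq,
    mem_flat_iff]
  simp

-- A's scan, characterised (for country1 ≠ country2)
lemma country_equal_iff (c1 c2 : String) (h : c1 ≠ c2) :
    country_equal c1 c2 = true ↔ ∃ g ∈ pvAliases, c1 ∈ g ∧ c2 ∈ g := by
  simp only [country_equal, beq_iff_eq, if_neg h, List.any_eq_true, Bool.and_eq_true,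
    bne_iff_ne, ne_eq]
  constructor
  · rintro ⟨g, hg, a1, ha1, a2, ha2, ⟨⟨-, rfl⟩, rfl⟩⟩
    exact ⟨g, hg, by simpa using ha1, by simpa using ha2⟩
  · rintro ⟨g, hg, h1, h2⟩
    exact ⟨g, hg, c1, h1, c2, h2, ⟨⟨h, rfl⟩, rfl⟩⟩

-- B's two lookups, characterised (for country1 ≠ country2)
lemma country_equal_alt_iff (c1 c2 : String) (h : c1 ≠ c2) :
    country_equal_alt c1 c2 = true ↔
      ∃ v, pvGroupOf.get? c1 = some v ∧ pvGroupOf.get? c2 = some v := by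
  unfold country_equal_alt
  rw [if_neg (by simpa using h)]
  cases h1 : pvGroupOf.get? c1 with
  | none => simp
  | some g1 =>
    cases h2 : pvGroupOf.get? c2 with
    | none => simp
    | some g2 =>
      simp only [Option.isSome_some, Bool.true_and, beq_iff_eq, Option.some.injEq]
      constructor
      · rintro rfl; exact ⟨g1, rfl, rfl⟩
      · rintro ⟨v, hv1, hv2⟩; cases hv1; cases hv2; rfl

-- ===== VERDICT (by name: the statement is the Claim_ definition above) =====
theorem country_equal_spec : Claim_equal_country_equal := by
  intro c1 c2 _
  unfold Spec_country_equal
  by_cases h : c1 = c2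
  · subst h; simp [country_equal, country_equal_alt]
  · rw [Bool.eq_iff_iff, country_equal_iff c1 c2 h, country_equal_alt_iff c1 c2 h]
    constructor
    · rintro ⟨g, hg, h1, h2⟩
      obtain ⟨i, hi, rfl⟩ := List.mem_iff_getElem.mp hg
      exact ⟨(i : Int), (get?_pvGroupOf_iff ..).mpr ⟨i, hi, h1, rfl⟩,
        (get?_pvGroupOf_iff ..).mpr ⟨i, hi, h2, rfl⟩⟩
    · rintro ⟨v, h1, h2⟩
      obtain ⟨i, hi, hc1, rfl⟩ := (get?_pvGroupOf_iff ..).mp h1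
      obtain ⟨j, hj, hc2, hv⟩ := (get?_pvGroupOf_iff ..).mp h2
      have hij : i = j := by exact_mod_cast hv
      subst hij
      exact ⟨pvAliases[i], List.getElem_mem hi, hc1, hc2⟩
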